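-- pv_equiv track=rewrite | github.com/eliperez-dev/UntilEveryCage | convert_italy_data.py | parse_species
-- ===== SOURCE A (Python) =====
-- def parse_species(species_str):
--     """
--     Parse species codes into animal types
--     B = Beef (Cattle)
--     C = Chicken/Poultry
--     O = Other
--     P = Pork (Pig)
--     S = Sheep
--     """
--     if not species_str or species_str == '-':
--         return {}
--
--     codes = [c.strip() for c in str(species_str).split('|')]
--
--     species_dict = {
--         'cattle': 'B' in codes,
--         'poultry': 'C' in codes,
--         'pork': 'P' in codes,
--         'sheep': 'S' in codes,
--         'other': 'O' in codes,
--     }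
--
--     return species_dict
-- ===== SOURCE B (Python) =====
-- def parse_species(species_str):
--     """Data-driven single pass: map codes to keys via a table instead of five membership scans."""
--     if not species_str or species_str == '-':
--         return {}
--     result = {'cattle': False, 'poultry': False, 'pork': False, 'sheep': False, 'other': False}
--     mapping = {'B': 'cattle', 'C': 'poultry', 'P': 'pork', 'S': 'sheep', 'O': 'other'}
--     for code in str(species_str).split('|'):
--         key = mapping.get(code.strip())
--         if key is not None:
--             result[key] = True
--     return result
-- ===== Notes on version B (the rewrite author's own statement) =====
-- stated objective: alternative
-- what changed: Replaces A's five separate list-membership scans over an intermediate stripped-codes list by a single data-driven pass: a code-to-key table and a result dict initialized to all-False, updated once per code.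
import Mathlib
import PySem

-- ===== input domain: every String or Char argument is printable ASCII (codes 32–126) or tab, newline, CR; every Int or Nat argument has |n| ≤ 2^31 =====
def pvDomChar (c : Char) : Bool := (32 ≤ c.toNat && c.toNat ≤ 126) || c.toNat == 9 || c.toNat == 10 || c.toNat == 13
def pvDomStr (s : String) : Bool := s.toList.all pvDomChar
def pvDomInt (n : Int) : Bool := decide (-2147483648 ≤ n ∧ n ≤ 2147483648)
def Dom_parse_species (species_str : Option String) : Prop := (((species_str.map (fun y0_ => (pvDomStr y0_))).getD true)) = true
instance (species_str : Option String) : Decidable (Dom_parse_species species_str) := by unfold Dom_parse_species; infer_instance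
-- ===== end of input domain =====

-- B replaces A's five repeated membership scans by one data-driven pass over the codes
-- with a code→key table (objective: alternative; same observable return value).

-- ===== PORT A =====
def parse_species (species_str : Option String) : List (String × Bool) :=
  match species_str with
  | none => []
  | some s =>
    if s = "" ∨ s = "-" then []
    else
      let codes : List String := ((PySem.Str.split? s "|").getD []).map PySem.Str.strip
      [("cattle", codes.contains "B"),
       ("poultry", codes.contains "C"),
       ("pork", codes.contains "P"),
       ("sheep", codes.contains "S"),
       ("other", codes.contains "O")]

-- ===== PORT B =====
def pvMapping : PySem.Dict String String :=
  PySem.Dict.mk [("B", "cattle"), ("C", "poultry"), ("P", "pork"), ("S", "sheep"), ("O", "other")]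

def parse_species_alt (species_str : Option String) : List (String × Bool) :=
  match species_str with
  | none => []
  | some s =>
    if s = "" ∨ s = "-" then []
    else
      let init : PySem.Dict String Bool :=
        PySem.Dict.mk [("cattle", false), ("poultry", false), ("pork", false), ("sheep", false), ("other", false)]
      ((((PySem.Str.split? s "|").getD []).foldl (fun d code =>
        match pvMapping.get? (PySem.Str.strip code) with
        | some k => PySem.Dict.insert d k true
        | none => d) init)).items

-- ===== PRECONDITION & SPEC =====
def Spec_parse_species (species_str : Option String) (out : List (String × Bool)) : Prop := out = parse_species_alt species_str
instance (species_str : Option String) (out : List (String × Bool)) : Decidable (Spec_parse_species species_str out) := by unfold Spec_parse_species; infer_instance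

-- ===== CLAIM (what is proved, stated in full; the proofs are below) =====
def Claim_equal_parse_species : Prop := ∀ (species_str : Option String), Dom_parse_species species_str → Spec_parse_species species_str (parse_species species_str)

-- ===== LEMMAS AND PROOFS =====

-- the loop invariant: starting from any five flags, the fold ORs in membership of each code
theorem pv_loop (L : List String) (b1 b2 b3 b4 b5 : Bool) :
    (L.foldl (fun d code =>
        match pvMapping.get? (PySem.Str.strip code) with
        | some k => PySem.Dict.insert d k true
        | none => d)
      (PySem.Dict.mk [("cattle", b1), ("poultry", b2), ("pork", b3), ("sheep", b4), ("other", b5)])).items =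
    [("cattle", b1 || (L.map PySem.Str.strip).contains "B"),
     ("poultry", b2 || (L.map PySem.Str.strip).contains "C"),
     ("pork", b3 || (L.map PySem.Str.strip).contains "P"),
     ("sheep", b4 || (L.map PySem.Str.strip).contains "S"),
     ("other", b5 || (L.map PySem.Str.strip).contains "O")] := by
  induction L generalizing b1 b2 b3 b4 b5 with
  | nil => simp
  | cons x xs ih =>
    simp only [List.foldl_cons, List.map_cons, List.contains_cons]
    by_cases h1 : PySem.Str.strip x = "B"
    · have hx : pvMapping.get? (PySem.Str.strip x) = some "cattle" := by
        simp [pvMapping, PySem.Dict.get?, h1]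
      have hins : (PySem.Dict.mk [("cattle", b1), ("poultry", b2), ("pork", b3), ("sheep", b4), ("other", b5)]).insert "cattle" true =
          PySem.Dict.mk [("cattle", true), ("poultry", b2), ("pork", b3), ("sheep", b4), ("other", b5)] := by
        simp [PySem.Dict.insert, PySem.Dict.contains]
      simp only [hx, hins]
      rw [ih]
      simp [h1]
    · by_cases h2 : PySem.Str.strip x = "C"
      · have hx : pvMapping.get? (PySem.Str.strip x) = some "poultry" := by
          simp [pvMapping, PySem.Dict.get?, h2]
        have hins : (PySem.Dict.mk [("cattle", b1), ("poultry", b2), ("pork", b3), ("sheep", b4), ("other", b5)]).insert "poultry" true =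
            PySem.Dict.mk [("cattle", b1), ("poultry", true), ("pork", b3), ("sheep", b4), ("other", b5)] := by
          simp [PySem.Dict.insert, PySem.Dict.contains]
        simp only [hx, hins]
        rw [ih]
        simp [h2]
      · by_cases h3 : PySem.Str.strip x = "P"
        · have hx : pvMapping.get? (PySem.Str.strip x) = some "pork" := by
            simp [pvMapping, PySem.Dict.get?, h3]
          have hins : (PySem.Dict.mk [("cattle", b1), ("poultry", b2), ("pork", b3), ("sheep", b4), ("other", b5)]).insert "pork" true =
              PySem.Dict.mk [("cattle", b1), ("poultry", b2), ("pork", true), ("sheep", b4), ("other", b5)] := by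
            simp [PySem.Dict.insert, PySem.Dict.contains]
          simp only [hx, hins]
          rw [ih]
          simp [h3]
        · by_cases h4 : PySem.Str.strip x = "S"
          · have hx : pvMapping.get? (PySem.Str.strip x) = some "sheep" := by
              simp [pvMapping, PySem.Dict.get?, h4]
            have hins : (PySem.Dict.mk [("cattle", b1), ("poultry", b2), ("pork", b3), ("sheep", b4), ("other", b5)]).insert "sheep" true =
                PySem.Dict.mk [("cattle", b1), ("poultry", b2), ("pork", b3), ("sheep", true), ("other", b5)] := by
              simp [PySem.Dict.insert, PySem.Dict.contains]
            simp only [hx, hins]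
            rw [ih]
            simp [h4]
          · by_cases h5 : PySem.Str.strip x = "O"
            · have hx : pvMapping.get? (PySem.Str.strip x) = some "other" := by
                simp [pvMapping, PySem.Dict.get?, h5]
              have hins : (PySem.Dict.mk [("cattle", b1), ("poultry", b2), ("pork", b3), ("sheep", b4), ("other", b5)]).insert "other" true =
                  PySem.Dict.mk [("cattle", b1), ("poultry", b2), ("pork", b3), ("sheep", b4), ("other", true)] := by
                simp [PySem.Dict.insert, PySem.Dict.contains]
              simp only [hx, hins]
              rw [ih]
              simp [h5]
            · have hm : pvMapping.get? (PySem.Str.strip x) = none := by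
                simp [pvMapping, PySem.Dict.get?,
                  Ne.symm h1, Ne.symm h2, Ne.symm h3, Ne.symm h4, Ne.symm h5]
              simp only [hm]
              rw [ih]
              simp [beq_eq_false_iff_ne.2 (Ne.symm h1), beq_eq_false_iff_ne.2 (Ne.symm h2),
                beq_eq_false_iff_ne.2 (Ne.symm h3), beq_eq_false_iff_ne.2 (Ne.symm h4),
                beq_eq_false_iff_ne.2 (Ne.symm h5)]

-- ===== VERDICT (by name: the statement is the Claim_ definition above) =====
theorem parse_species_spec : Claim_equal_parse_species := by
  intro species_str _
  unfold Spec_parse_species parse_species parse_species_alt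
  match species_str with
  | none => rfl
  | some s =>
    by_cases hg : s = "" ∨ s = "-"
    · simp [hg]
    · simp only [hg, if_false]
      rw [pv_loop]
      simp
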